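-- pv_equiv track=rewrite | github.com/Peazfull/the-forge | services/nl_brewery/nl_brewery_service.py | _parse_temp_block
-- ===== SOURCE A (Python) =====
-- from typing import List, Dict, Set, Tuple, Optional
--
-- def _parse_temp_block(block: str) -> Optional[Dict[str, str]]:
--     if not block.strip():
--         return None
--     lines = block.splitlines()
--     header = {}
--     body_lines = []
--     in_body = False
--     for line in lines:
--         if not in_body and line.strip() == "":
--             in_body = True
--             continue
--         if not in_body:
--             if ":" in line:
--                 key, value = line.split(":", 1)
--                 header[key.strip().lower()] = value.strip()
--         else:
--             body_lines.append(line)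
--     body_text = "\n".join(body_lines).strip()
--     if not body_text:
--         return None
--     return {
--         "sender": header.get("from", ""),
--         "to": header.get("to", ""),
--         "subject": header.get("subject", ""),
--         "date": header.get("date", ""),
--         "body_text": body_text,
--     }
-- ===== SOURCE B (Python) =====
-- from typing import Optional, Dict, List
--
--
-- def _parse_temp_block(block: str) -> Optional[Dict[str, str]]:
--     if not block.strip():
--         return None
--     lines = block.splitlines()
--     idx = next((i for i, l in enumerate(lines) if not l.strip()), None)
--     if idx is None:
--         return None
--     body_text = "\n".join(lines[idx + 1:]).strip()
--     if not body_text: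
--         return None
--     header_rev = lines[:idx][::-1]
--
--     def last_value(key: str) -> str:
--         for line in header_rev:
--             if ":" in line:
--                 k, v = line.split(":", 1)
--                 if k.strip().lower() == key:
--                     return v.strip()
--         return ""
--
--     return {
--         "sender": last_value("from"),
--         "to": last_value("to"),
--         "subject": last_value("subject"),
--         "date": last_value("date"),
--         "body_text": body_text,
--     }
-- ===== Notes on version B (the rewrite author's own statement) =====
-- stated objective: alternative
-- what changed: A's single-pass state-machine loop (in_body flag, header dict, body accumulator) is replaced by a boundary-first decomposition: find the index of the first blank line, join the suffix as the body, and extract each of the four header fields by a first-match scan over the reversed header prefix instead of building a dict.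
import Mathlib
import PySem

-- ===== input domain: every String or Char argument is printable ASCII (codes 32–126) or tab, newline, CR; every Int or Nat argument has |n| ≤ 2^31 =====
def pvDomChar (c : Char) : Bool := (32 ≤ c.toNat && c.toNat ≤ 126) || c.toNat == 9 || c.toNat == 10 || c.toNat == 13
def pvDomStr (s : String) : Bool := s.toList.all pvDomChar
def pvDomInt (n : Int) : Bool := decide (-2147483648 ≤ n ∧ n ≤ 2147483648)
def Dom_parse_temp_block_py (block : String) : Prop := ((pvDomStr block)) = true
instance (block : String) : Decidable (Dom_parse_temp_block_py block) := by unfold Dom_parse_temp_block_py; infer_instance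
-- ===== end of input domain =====

-- B replaces A's one-pass state-machine loop by a boundary-first decomposition: find the first
-- blank line, join the tail as the body, and extract each of the four header fields by a
-- reverse first-match scan instead of building a dict (objective: alternative decomposition).

-- ===== PORT A =====
-- the 'if ":" in line: key, value = line.split(":", 1); header[...] = ...' block of A's loop
def pvHeaderStep (header : PySem.Dict String String) (line : String) : PySem.Dict String String :=
  if PySem.Str.isIn ":" line then
    match PySem.Str.splitMax? line ":" 1 with
    | some (key :: value :: _) =>
        header.insert (PySem.Str.lower (PySem.Str.strip key)) (PySem.Str.strip value)
    | _ => header   -- unreachable: split(":",1) with ":" in line yields exactly two pieces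
  else header

-- one iteration of A's 'for line in lines' loop; state = (header, body_lines, in_body)
def pvAStep (s : PySem.Dict String String × List String × Bool) (line : String) :
    PySem.Dict String String × List String × Bool :=
  if s.2.2 = false ∧ PySem.Str.strip line = "" then (s.1, s.2.1, true)
  else if s.2.2 = false then (pvHeaderStep s.1 line, s.2.1, s.2.2)
  else (s.1, s.2.1 ++ [line], s.2.2)

def parse_temp_block_py (block : String) : Option (List (String × String)) :=
  if PySem.Str.strip block = "" then none
  else
    let lines := PySem.Str.splitlines block
    let st := lines.foldl pvAStep (PySem.Dict.empty, [], false)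
    let body_text := PySem.Str.strip (PySem.Str.join "\n" st.2.1)
    if body_text = "" then none
    else some [("sender", st.1.getD "from" ""), ("to", st.1.getD "to" ""),
               ("subject", st.1.getD "subject" ""), ("date", st.1.getD "date" ""),
               ("body_text", body_text)]

-- ===== PORT B =====
-- next((i for i, l in enumerate(lines) if not l.strip()), None)
def pvFindBlank : List String → Option Nat
  | [] => none
  | l :: rest => if PySem.Str.strip l = "" then some 0 else (pvFindBlank rest).map (· + 1)

-- B's last_value: first match scanning the reversed header lines
def pvLastValue (headerRev : List String) (key : String) : String :=
  match headerRev with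
  | [] => ""
  | line :: rest =>
    if PySem.Str.isIn ":" line then
      match PySem.Str.splitMax? line ":" 1 with
      | some (k :: v :: _) =>
          if PySem.Str.lower (PySem.Str.strip k) = key then PySem.Str.strip v
          else pvLastValue rest key
      | _ => pvLastValue rest key
    else pvLastValue rest key

def parse_temp_block_py_alt (block : String) : Option (List (String × String)) :=
  if PySem.Str.strip block = "" then none
  else
    let lines := PySem.Str.splitlines block
    match pvFindBlank lines with
    | none => none
    | some idx =>
      -- idx is a valid nonnegative index, so lines[idx+1:] = drop, lines[:idx] = take
      let body_text := PySem.Str.strip (PySem.Str.join "\n" (lines.drop (idx + 1)))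
      if body_text = "" then none
      else
        let headerRev := (lines.take idx).reverse
        some [("sender", pvLastValue headerRev "from"), ("to", pvLastValue headerRev "to"),
              ("subject", pvLastValue headerRev "subject"), ("date", pvLastValue headerRev "date"),
              ("body_text", body_text)]

-- ===== PRECONDITION & SPEC =====
def Spec_parse_temp_block_py (block : String) (out : Option (List (String × String))) : Prop := out = parse_temp_block_py_alt block
instance (block : String) (out : Option (List (String × String))) : Decidable (Spec_parse_temp_block_py block out) := by unfold Spec_parse_temp_block_py; infer_instance

-- ===== CLAIM (what is proved, stated in full; the proofs are below) =====
def Claim_equal_parse_temp_block_py : Prop := ∀ (block : String), Dom_parse_temp_block_py block → Spec_parse_temp_block_py block (parse_temp_block_py block)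

-- ===== LEMMAS AND PROOFS =====

-- once in_body is set, A's loop only appends every remaining line to body_lines
lemma foldl_pvAStep_true (ls : List String) (d : PySem.Dict String String) (b : List String) :
    ls.foldl pvAStep (d, b, true) = (d, b ++ ls, true) := by
  induction ls generalizing b with
  | nil => simp
  | cons l rest ih =>
    simp only [List.foldl_cons, pvAStep]
    simp [ih]

-- A's loop splits the lines at the first blank line (pvFindBlank), folding pvHeaderStep
-- over the prefix and appending the suffix to body_lines
lemma foldl_pvAStep_false (ls : List String) (d : PySem.Dict String String) (b : List String) :
    ls.foldl pvAStep (d, b, false) =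
      match pvFindBlank ls with
      | none => (ls.foldl pvHeaderStep d, b, false)
      | some i => ((ls.take i).foldl pvHeaderStep d, b ++ ls.drop (i + 1), true) := by
  induction ls generalizing d b with
  | nil => simp [pvFindBlank]
  | cons l rest ih =>
    by_cases hbl : PySem.Str.strip l = ""
    · simp only [List.foldl_cons, pvAStep, hbl, and_true]
      simp [pvFindBlank, hbl, foldl_pvAStep_true]
    · simp only [List.foldl_cons, pvAStep]
      rw [if_neg (by simp [hbl]), if_pos trivial]
      rw [ih]
      simp only [pvFindBlank, if_neg hbl]
      cases h : pvFindBlank rest with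
      | none => simp
      | some i => simp

-- the value A's header-dict branch would record for a given key from one line
def pvHVal? (line key : String) : Option String :=
  if PySem.Str.isIn ":" line then
    match PySem.Str.splitMax? line ":" 1 with
    | some (k :: v :: _) =>
        if PySem.Str.lower (PySem.Str.strip k) = key then some (PySem.Str.strip v) else none
    | _ => none
  else none

-- first pvHVal? hit along a list
def pvFirstVal? : List String → String → Option String
  | [], _ => none
  | l :: rest, key => (pvHVal? l key).or (pvFirstVal? rest key)

lemma pvLastValue_eq (ls : List String) (key : String) :
    pvLastValue ls key = (pvFirstVal? ls key).getD "" := by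
  induction ls with
  | nil => rfl
  | cons l rest ih =>
    simp only [pvLastValue, pvFirstVal?, pvHVal?]
    cases hc : PySem.Str.isIn ":" l with
    | false => simp [ih]
    | true =>
      cases h : PySem.Str.splitMax? l ":" 1 with
      | none => simpa using ih
      | some parts =>
        match parts with
        | [] => simpa using ih
        | [k] => simpa using ih
        | k :: v :: t =>
          by_cases hk : PySem.Str.lower (PySem.Str.strip k) = key
          · simp [hk]
          · simp [hk, ih]

lemma pvFirstVal?_append (a b : List String) (key : String) :
    pvFirstVal? (a ++ b) key = (pvFirstVal? a key).or (pvFirstVal? b key) := by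
  induction a with
  | nil => simp [pvFirstVal?]
  | cons l rest ih => simp [pvFirstVal?, ih, Option.or_assoc]

lemma get?_pvHeaderStep (d : PySem.Dict String String) (l key : String) :
    (pvHeaderStep d l).get? key = (pvHVal? l key).or (d.get? key) := by
  unfold pvHeaderStep pvHVal?
  cases hc : PySem.Str.isIn ":" l with
  | false => simp
  | true =>
    cases h : PySem.Str.splitMax? l ":" 1 with
    | none => simp
    | some parts =>
      match parts with
      | [] => simp
      | [k] => simp
      | k :: v :: t =>
        by_cases hk : PySem.Str.lower (PySem.Str.strip k) = key
        · simp [hk, PySem.Dict.get?_insert_self]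
        · have hne : key ≠ PySem.Str.lower (PySem.Str.strip k) := fun h' => hk h'.symm
          simp [hk, PySem.Dict.get?_insert_of_ne d (PySem.Str.strip v) hne]

lemma get?_foldl_pvHeaderStep (ls : List String) (d : PySem.Dict String String) (key : String) :
    (ls.foldl pvHeaderStep d).get? key = (pvFirstVal? ls.reverse key).or (d.get? key) := by
  induction ls generalizing d with
  | nil => simp [pvFirstVal?]
  | cons l rest ih =>
    simp only [List.foldl_cons, List.reverse_cons]
    rw [ih, pvFirstVal?_append, get?_pvHeaderStep, Option.or_assoc]
    simp [pvFirstVal?]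

lemma getD_foldl_header (ls : List String) (key : String) :
    (ls.foldl pvHeaderStep PySem.Dict.empty).getD key "" = pvLastValue ls.reverse key := by
  rw [PySem.Dict.getD, get?_foldl_pvHeaderStep, pvLastValue_eq]
  simp [PySem.Dict.empty, PySem.Dict.get?]

-- ===== VERDICT (by name: the statement is the Claim_ definition above) =====
theorem parse_temp_block_py_spec : Claim_equal_parse_temp_block_py := by
  intro block _
  unfold Spec_parse_temp_block_py parse_temp_block_py parse_temp_block_py_alt
  by_cases hs : PySem.Str.strip block = ""
  · simp [hs]
  · simp only [if_neg hs]
    rw [foldl_pvAStep_false]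
    cases h : pvFindBlank (PySem.Str.splitlines block) with
    | none =>
      have hj : PySem.Str.strip (PySem.Str.join "\n" []) = "" := by decide
      simp [hj]
    | some i =>
      simp only [List.nil_append]
      by_cases hb : PySem.Str.strip (PySem.Str.join "\n"
          ((PySem.Str.splitlines block).drop (i + 1))) = ""
      · simp [hb]
      · simp [hb, getD_foldl_header]
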